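-- pv_equiv track=rewrite | github.com/Nileshwar-Paul-au17/Python | python/Unique-character.py | check
-- ===== SOURCE A (Python) =====
-- def check(str):
--
--     dict={}
--
--     for i in str:
--         if i in dict:
--             dict[i] += 1
--         else:
--             dict[i] = 1
--
--     for character, frequency in dict.items():
--         if frequency > 1:
--             return "YES"
--
--     return "NO"
-- ===== SOURCE B (Python) =====
-- def check(str):
--     return "YES" if len(set(str)) != len(str) else "NO"
-- ===== Notes on version B (the rewrite author's own statement) =====
-- stated objective: simpler
-- what changed: Replaced the frequency-dict building loop and the items-scanning loop with a single size comparison: a character repeats iff len(set(s)) != len(s).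
import Mathlib
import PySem

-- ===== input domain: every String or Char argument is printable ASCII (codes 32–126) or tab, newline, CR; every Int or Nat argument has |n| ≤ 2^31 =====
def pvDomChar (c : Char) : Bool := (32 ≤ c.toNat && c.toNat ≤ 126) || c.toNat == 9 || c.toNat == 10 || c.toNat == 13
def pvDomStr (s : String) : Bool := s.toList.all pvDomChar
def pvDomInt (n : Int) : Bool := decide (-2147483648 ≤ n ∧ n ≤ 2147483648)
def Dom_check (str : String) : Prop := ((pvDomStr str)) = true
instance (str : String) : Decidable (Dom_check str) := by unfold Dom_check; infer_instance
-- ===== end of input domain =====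

-- B replaces A's frequency dict and its two loops by the single comparison len(set(s)) != len(s): simpler, same cost.

-- ===== PORT A =====
-- the second loop of A: scan the dict items, return "YES" on the first frequency > 1
def checkScan : List (Char × Int) → String
  | [] => "NO"
  | (_, f) :: rest => if f > 1 then "YES" else checkScan rest

def check (str : String) : String :=
  let d : PySem.Dict Char Int :=
    str.toList.foldl
      (fun d i => if d.contains i then d.modify i 0 (· + 1) else d.insert i 1)
      PySem.Dict.empty
  checkScan d.items

-- ===== PORT B =====
def check_alt (str : String) : String :=
  if (PySem.Set.ofList str.toList).length ≠ str.toList.length then "YES" else "NO"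

-- ===== PRECONDITION & SPEC =====
def Spec_check (str : String) (out : String) : Prop := out = check_alt str
instance (str : String) (out : String) : Decidable (Spec_check str out) := by unfold Spec_check; infer_instance

-- ===== CLAIM (what is proved, stated in full; the proofs are below) =====
def Claim_equal_check : Prop := ∀ (str : String), Dom_check str → Spec_check str (check str)

-- ===== LEMMAS AND PROOFS =====

-- A's loop body equals Counter's loop body
lemma step_eq_counter (d : PySem.Dict Char Int) (i : Char) :
    (if d.contains i then d.modify i 0 (· + 1) else d.insert i 1) = d.modify i 0 (· + 1) := by
  by_cases h : d.contains i
  · rw [if_pos h]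
  · rw [if_neg h]
    have hg : d.getD i 0 = 0 := by
      simp only [PySem.Dict.getD]
      rw [(PySem.Dict.get?_eq_none_iff_contains d i).mpr (by simpa using h)]
      rfl
    simp [PySem.Dict.modify, hg]

lemma fold_eq_counter (l : List Char) :
    l.foldl (fun d i => if d.contains i then d.modify i 0 (· + 1) else d.insert i 1)
      (PySem.Dict.empty : PySem.Dict Char Int) = PySem.Dict.counter l := by
  rw [PySem.Dict.counter_eq_foldl]
  congr 1
  funext d i
  exact step_eq_counter d i

lemma checkScan_yes_iff (ps : List (Char × Int)) :
    checkScan ps = "YES" ↔ ∃ p ∈ ps, p.2 > 1 := by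
  induction ps with
  | nil => simp [checkScan]
  | cons p rest ih =>
    obtain ⟨k, f⟩ := p
    simp only [checkScan]
    split_ifs with h
    · simp [h]
    · simp [ih, h]

lemma checkScan_no (ps : List (Char × Int)) (h : checkScan ps ≠ "YES") : checkScan ps = "NO" := by
  induction ps with
  | nil => rfl
  | cons p rest ih =>
    obtain ⟨k, f⟩ := p
    simp only [checkScan] at h ⊢
    split_ifs with hf
    · simp [hf] at h
    · exact ih (by simpa [hf] using h)

lemma ofList_length_eq_iff (l : List Char) :
    (PySem.Set.ofList l).length = l.length ↔ l.Nodup := by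
  constructor
  · intro h
    have hperm : (PySem.Set.ofList l).Perm l.dedup := by
      rw [List.perm_ext_iff_of_nodup (PySem.Set.nodup_ofList l) l.nodup_dedup]
      intro a; rw [PySem.Set.mem_ofList, List.mem_dedup]
    have hlen : l.dedup.length = l.length := by rw [← hperm.length_eq, h]
    have : l.dedup = l := (List.dedup_sublist l).eq_of_length hlen
    rw [← List.dedup_eq_self]; exact this
  · intro h; rw [PySem.Set.ofList_eq_self_of_nodup l h]

lemma nodup_iff_no_big_count (l : List Char) :
    l.Nodup ↔ ¬ ∃ k, l.count k > 1 := by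
  rw [List.nodup_iff_count_le_one]
  constructor
  · rintro h ⟨k, hk⟩; exact absurd (h k) (by omega)
  · intro h k; by_contra hk; exact h ⟨k, by omega⟩

theorem check_eq (str : String) : check str = check_alt str := by
  simp only [check, check_alt, fold_eq_counter, PySem.Dict.items_counter]
  set l := str.toList with hl
  by_cases hnd : l.Nodup
  · rw [if_neg (by simp [(ofList_length_eq_iff l).mpr hnd])]
    apply checkScan_no
    intro h
    obtain ⟨p, hp, hbig⟩ := (checkScan_yes_iff _).mp h
    simp only [List.mem_map] at hp
    obtain ⟨k, -, rfl⟩ := hp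
    have := (nodup_iff_no_big_count l).mp hnd
    exact this ⟨k, by simp only [] at hbig; exact_mod_cast hbig⟩
  · rw [if_pos (fun h => hnd ((ofList_length_eq_iff l).mp h))]
    rw [checkScan_yes_iff]
    have hex : ∃ k, l.count k > 1 := by
      by_contra hno; exact hnd ((nodup_iff_no_big_count l).mpr hno)
    obtain ⟨k, hk⟩ := hex
    refine ⟨(k, (l.count k : Int)), List.mem_map.mpr ⟨k, ?_, rfl⟩, by show ((l.count k : Int)) > 1; exact_mod_cast hk⟩
    rw [PySem.Set.mem_ofList]
    exact List.count_pos_iff.mp (by omega)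

-- ===== VERDICT (by name: the statement is the Claim_ definition above) =====
theorem check_spec : Claim_equal_check := by
  intro str _
  unfold Spec_check
  exact check_eq str
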